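-- pv_equiv track=rewrite | github.com/croco-pie/study-projects-repo | TG_bot_funcs.py | recognize_lable
-- ===== SOURCE A (Python) =====
-- def recognize_lable(text, lables):
--     requested_lable = text.upper()
--     is_in_lables = 'Упс... Кажется, такой маркировки нет в базе. Проверьте правильность ввода: например, 1, 01, PVC.'
--     for key, value in lables.items():
--         for lable in value:
--             if requested_lable in value:
--                 is_in_lables = key
--                 break
--     return is_in_lables
-- ===== SOURCE B (Python) =====
-- def recognize_lable(text, lables):
--     requested_lable = text.upper()
--     for key, value in reversed(lables.items()):
--         if requested_lable in value:
--             return key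
--     return 'Упс... Кажется, такой маркировки нет в базе. Проверьте правильность ввода: например, 1, 01, PVC.'
-- ===== Notes on version B (the rewrite author's own statement) =====
-- stated objective: simpler
-- what changed: B iterates the dict in reverse and returns the first key whose value list contains the requested label (first-match-in-reverse = last-match-forward), replacing A's full forward scan with a nested loop that overwrites an accumulator; B also early-returns instead of scanning everything.
import Mathlib
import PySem

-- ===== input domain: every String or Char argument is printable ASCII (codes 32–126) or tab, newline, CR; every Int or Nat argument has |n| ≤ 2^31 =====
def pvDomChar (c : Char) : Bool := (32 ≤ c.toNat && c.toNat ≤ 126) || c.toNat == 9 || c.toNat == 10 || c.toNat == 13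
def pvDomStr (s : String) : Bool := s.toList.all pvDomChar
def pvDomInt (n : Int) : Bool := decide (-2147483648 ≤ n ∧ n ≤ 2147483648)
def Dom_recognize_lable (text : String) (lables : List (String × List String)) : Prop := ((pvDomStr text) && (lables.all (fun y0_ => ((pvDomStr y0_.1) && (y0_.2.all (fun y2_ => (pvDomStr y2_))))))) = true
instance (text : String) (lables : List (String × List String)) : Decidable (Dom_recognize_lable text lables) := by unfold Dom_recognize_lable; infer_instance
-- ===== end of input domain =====

-- B iterates the dict in reverse and returns the first key containing the label (early return),
-- instead of A's forward scan that keeps overwriting an accumulator. Objective: simpler.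

-- ===== PORT A =====
-- inner loop: `for lable in value: if requested_lable in value: is_in_lables = key; break`
-- (the membership test re-reads the WHOLE value list on each iteration, as in A)
def recognize_lable_inner (req key : String) (value : List String) :
    List String → String → String
  | [], acc => acc
  | _ :: rest, acc =>
      if req ∈ value then key else recognize_lable_inner req key value rest acc

-- outer loop: `for key, value in lables.items(): <inner loop>`
def recognize_lable_loop (req : String) : List (String × List String) → String → String
  | [], acc => acc
  | (key, value) :: rest, acc =>
      recognize_lable_loop req rest (recognize_lable_inner req key value value acc)

def recognize_lable (text : String) (lables : List (String × List String)) : String :=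
  let requested_lable := PySem.Str.upper text
  let is_in_lables := "Упс... Кажется, такой маркировки нет в базе. Проверьте правильность ввода: например, 1, 01, PVC."
  recognize_lable_loop requested_lable lables is_in_lables

-- ===== PORT B =====
-- `for key, value in reversed(lables.items()): if requested_lable in value: return key`
def recognize_lable_alt_find (req : String) : List (String × List String) → Option String
  | [] => none
  | (key, value) :: rest =>
      if req ∈ value then some key else recognize_lable_alt_find req rest

def recognize_lable_alt (text : String) (lables : List (String × List String)) : String :=
  let requested_lable := PySem.Str.upper text
  match recognize_lable_alt_find requested_lable lables.reverse with
  | some key => key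
  | none => "Упс... Кажется, такой маркировки нет в базе. Проверьте правильность ввода: например, 1, 01, PVC."

-- ===== PRECONDITION & SPEC =====
def Spec_recognize_lable (text : String) (lables : List (String × List String)) (out : String) : Prop := out = recognize_lable_alt text lables
instance (text : String) (lables : List (String × List String)) (out : String) : Decidable (Spec_recognize_lable text lables out) := by unfold Spec_recognize_lable; infer_instance

-- ===== CLAIM (what is proved, stated in full; the proofs are below) =====
def Claim_equal_recognize_lable : Prop := ∀ (text : String) (lables : List (String × List String)), Dom_recognize_lable text lables → Spec_recognize_lable text lables (recognize_lable text lables)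

-- ===== LEMMAS AND PROOFS =====

-- A's inner loop collapses: called with rem = value, it returns key iff value contains req.
theorem recognize_lable_inner_gen (req key : String) (value : List String) (acc : String) :
    ∀ rem, recognize_lable_inner req key value rem acc
      = if rem ≠ [] ∧ req ∈ value then key else acc := by
  intro rem
  induction rem with
  | nil => simp [recognize_lable_inner]
  | cons x xs ih =>
      by_cases h : req ∈ value <;> simp [recognize_lable_inner, h, ih]

theorem recognize_lable_inner_eq (req key : String) (value : List String) (acc : String) :
    recognize_lable_inner req key value value acc = if req ∈ value then key else acc := by
  rw [recognize_lable_inner_gen]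
  cases value <;> simp
theorem recognize_lable_alt_find_append (req : String) (xs ys : List (String × List String)) :
    recognize_lable_alt_find req (xs ++ ys)
      = (recognize_lable_alt_find req xs).or (recognize_lable_alt_find req ys) := by
  induction xs with
  | nil => simp [recognize_lable_alt_find]
  | cons p rest ih =>
      obtain ⟨k, v⟩ := p
      by_cases h : req ∈ v <;> simp [recognize_lable_alt_find, h, ih]

theorem recognize_lable_loop_eq (req : String) (L : List (String × List String)) :
    ∀ acc, recognize_lable_loop req L acc
      = ((recognize_lable_alt_find req L.reverse).getD acc) := by
  induction L with
  | nil => intro acc; simp [recognize_lable_loop, recognize_lable_alt_find]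
  | cons p rest ih =>
      intro acc
      obtain ⟨k, v⟩ := p
      simp only [recognize_lable_loop, ih, List.reverse_cons,
        recognize_lable_alt_find_append, recognize_lable_inner_eq]
      cases hfind : recognize_lable_alt_find req rest.reverse with
      | some k' => simp [Option.or]
      | none =>
          by_cases h : req ∈ v <;> simp [Option.or, recognize_lable_alt_find, h]

-- ===== VERDICT (by name: the statement is the Claim_ definition above) =====
theorem recognize_lable_spec : Claim_equal_recognize_lable := by
  intro text lables _
  unfold Spec_recognize_lable recognize_lable recognize_lable_alt
  simp only [recognize_lable_loop_eq]
  cases hfind : recognize_lable_alt_find (PySem.Str.upper text) lables.reverse <;> simp
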